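-- pv_equiv track=rewrite | github.com/YinuoWang/competitive_programming | TopCoder/BSRM_2/BSRM_2_B.py | selectedTotal
-- ===== SOURCE A (Python) =====
-- def selectedTotal(values, multiple):
--     vis = set()
--     for i, val in enumerate(values):
--         if val in vis:
--             continue
--         for j in range(len(values)):
--             if i == j:
--                 continue
--             if (val + values[j]) % multiple == 0:
--                 vis.add(val)
--                 vis.add(values[j])
--                 break
--
--     return sum(vis)
-- ===== SOURCE B (Python) =====
-- def selectedTotal(values, multiple):
--     cnt = {}
--     for v in values:
--         r = v % multiple
--         cnt[r] = cnt.get(r, 0) + 1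
--     total = 0
--     for v in set(values):
--         r = v % multiple
--         need = (-v) % multiple
--         c = cnt.get(need, 0)
--         if need == r:
--             c = c - 1
--         if 0 < c:
--             total = total + v
--     return total
-- ===== Notes on version B (the rewrite author's own statement) =====
-- stated objective: faster
-- what changed: A scans all other indices for each value (quadratic); B builds a residue-mod-multiple counter once and qualifies each distinct value by a single lookup of the complementary residue (requiring count >= 2 when the value pairs with its own residue class), then sums the qualifying distinct values.
-- outside the precondition, e.g. on selectedTotal([7], 0): A returns 0, B raises ZeroDivisionError; on selectedTotal([], 0): A returns 0, B returns 0
import Mathlib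
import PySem

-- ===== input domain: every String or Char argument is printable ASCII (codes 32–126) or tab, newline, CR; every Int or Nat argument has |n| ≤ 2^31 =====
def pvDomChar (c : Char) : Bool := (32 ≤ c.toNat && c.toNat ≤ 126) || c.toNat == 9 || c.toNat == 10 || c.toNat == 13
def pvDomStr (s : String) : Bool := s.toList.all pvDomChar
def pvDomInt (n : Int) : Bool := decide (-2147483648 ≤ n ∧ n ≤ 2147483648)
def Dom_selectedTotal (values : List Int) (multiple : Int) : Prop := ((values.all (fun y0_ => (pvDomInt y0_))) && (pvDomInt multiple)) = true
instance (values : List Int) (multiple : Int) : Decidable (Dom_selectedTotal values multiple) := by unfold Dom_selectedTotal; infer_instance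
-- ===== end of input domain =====

-- B replaces A's quadratic scan for a partner of each value by a single residue counter
-- (a value qualifies iff the complementary residue occurs at a distinct index); objective: faster.

-- ===== PORT A =====
-- inner 'for j in range(len(values))' with its break; values[j] is in range, so pyGetD is exact
def pvLoopJ (values : List Int) (multiple : Int) (i val : Int) (vis : PySem.Set Int) : List Int → PySem.Set Int
  | [] => vis
  | j :: js =>
    if i = j then pvLoopJ values multiple i val vis js
    else if PySem.Int.mod (val + PySem.List.pyGetD values j 0) multiple = 0 then
      PySem.Set.add (PySem.Set.add vis val) (PySem.List.pyGetD values j 0)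
    else pvLoopJ values multiple i val vis js

def selectedTotal (values : List Int) (multiple : Int) : Int :=
  ((PySem.List.enumerate values 0).foldl
    (fun vis p =>
      if PySem.Set.contains vis p.2 then vis
      else pvLoopJ values multiple p.1 p.2 vis (PySem.List.pyRange 0 (PySem.List.len values) 1))
    PySem.Set.empty).sum   -- sum over a set: order-independent

-- ===== PORT B =====
def selectedTotal_alt (values : List Int) (multiple : Int) : Int :=
  let cnt : PySem.Dict Int Int := values.foldl
    (fun d v => d.insert (PySem.Int.mod v multiple) (d.getD (PySem.Int.mod v multiple) 0 + 1))
    PySem.Dict.empty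
  (PySem.Set.ofList values).foldl
    (fun total v =>
      let r := PySem.Int.mod v multiple
      let need := PySem.Int.mod (-v) multiple
      let c := cnt.getD need 0
      let c := if need = r then c - 1 else c
      if 0 < c then total + v else total)
    0

-- ===== PRECONDITION & SPEC =====
-- Pre_ excludes only multiple = 0: Python's '%' raises ZeroDivisionError there (A happens to avoid
-- the '%' and returns 0 on lists of length ≤ 1, but B's counter pass raises on any non-empty list).
def Pre_selectedTotal (values : List Int) (multiple : Int) : Prop := multiple ≠ 0
instance (values : List Int) (multiple : Int) : Decidable (Pre_selectedTotal values multiple) := by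
  unfold Pre_selectedTotal; infer_instance
def pvWitness_selectedTotal : List Int × Int := ([1, 2, 3], 2)

def Spec_selectedTotal (values : List Int) (multiple : Int) (out : Int) : Prop := out = selectedTotal_alt values multiple
instance (values : List Int) (multiple : Int) (out : Int) : Decidable (Spec_selectedTotal values multiple out) := by unfold Spec_selectedTotal; infer_instance

-- ===== CLAIM (what is proved, stated in full; the proofs are below) =====
def Claim_equal_selectedTotal : Prop := ∀ (values : List Int) (multiple : Int), Dom_selectedTotal values multiple → Pre_selectedTotal values multiple → Spec_selectedTotal values multiple (selectedTotal values multiple)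

-- ===== LEMMAS AND PROOFS =====

-- x "qualifies": it occurs at some index i and some OTHER index j holds a partner w with (x+w) % m == 0
def pvQual (values : List Int) (m x : Int) : Prop :=
  ∃ (i j : Nat) (hi : i < values.length) (hj : j < values.length),
    i ≠ j ∧ values[i] = x ∧ PySem.Int.mod (x + values[j]) m = 0

-- equal Python remainders = difference divisible (any m; PySem.Int.mod a 0 = a)
theorem pv_mod_eq_mod_iff_dvd_sub (a b m : Int) :
    PySem.Int.mod a m = PySem.Int.mod b m ↔ m ∣ (a - b) := by
  have ha := PySem.Int.floordiv_mul_add_mod a m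
  have hb := PySem.Int.floordiv_mul_add_mod b m
  set da := PySem.Int.floordiv a m with hda
  set db := PySem.Int.floordiv b m with hdb
  set ma := PySem.Int.mod a m with hma
  set mb := PySem.Int.mod b m with hmb
  constructor
  · intro h
    exact ⟨da - db, by linear_combination -ha + hb + h⟩
  · rintro ⟨k, hk⟩
    have hdiff : ma - mb = m * (k - da + db) := by linear_combination ha - hb + hk
    rcases lt_trichotomy m 0 with hm | hm | hm
    · have b1 := PySem.Int.mod_neg_bounds a hm
      have b2 := PySem.Int.mod_neg_bounds b hm
      have hdvd : (-m) ∣ (ma - mb) := by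
        rw [neg_dvd]; exact ⟨k - da + db, hdiff⟩
      have := Int.eq_zero_of_abs_lt_dvd hdvd (by rw [abs_lt]; constructor <;> omega)
      omega
    · subst hm; omega
    · have b1 := PySem.Int.mod_nonneg a hm
      have b2 := PySem.Int.mod_lt a hm
      have b3 := PySem.Int.mod_nonneg b hm
      have b4 := PySem.Int.mod_lt b hm
      have hdvd : m ∣ (ma - mb) := ⟨k - da + db, hdiff⟩
      have := Int.eq_zero_of_abs_lt_dvd hdvd (by rw [abs_lt]; constructor <;> omega)
      omega

theorem pv_partner_iff (x w m : Int) :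
    PySem.Int.mod (x + w) m = 0 ↔ PySem.Int.mod w m = PySem.Int.mod (-x) m := by
  rw [PySem.Int.mod_eq_zero_iff_dvd, pv_mod_eq_mod_iff_dvd_sub, sub_neg_eq_add, add_comm]

theorem pv_self_iff (x m : Int) :
    PySem.Int.mod (-x) m = PySem.Int.mod x m ↔ PySem.Int.mod (x + x) m = 0 := by
  rw [PySem.Int.mod_eq_zero_iff_dvd, pv_mod_eq_mod_iff_dvd_sub]
  constructor <;> intro h
  · have : -x - x = -(x + x) := by ring
    rw [this, dvd_neg] at h; exact h
  · have : -x - x = -(x + x) := by ring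
    rw [this, dvd_neg]; exact h

def pvHit (values : List Int) (multiple i val : Int) (js : List Int) : Option Int :=
  js.find? (fun j => decide (¬ i = j ∧ PySem.Int.mod (val + PySem.List.pyGetD values j 0) multiple = 0))

theorem pvLoopJ_eq_hit (values : List Int) (multiple i val : Int) (vis : PySem.Set Int)
    (js : List Int) :
    pvLoopJ values multiple i val vis js =
      match pvHit values multiple i val js with
      | none => vis
      | some j => PySem.Set.add (PySem.Set.add vis val) (PySem.List.pyGetD values j 0) := by
  induction js with
  | nil => rfl
  | cons j js ih =>
    by_cases h1 : i = j
    · simp [pvLoopJ, pvHit, List.find?_cons, h1] at ih ⊢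
      simpa [pvHit] using ih
    · by_cases h2 : PySem.Int.mod (val + PySem.List.pyGetD values j 0) multiple = 0
      · simp [pvLoopJ, pvHit, List.find?_cons, h1, h2]
      · simp [pvLoopJ, pvHit, List.find?_cons, h1, h2] at ih ⊢
        simpa [pvHit] using ih

-- two distinct indices satisfying p give countP ≥ 2
theorem pv_two_le_countP (l : List Int) (p : Int → Bool) (i j : Nat)
    (hi : i < l.length) (hj : j < l.length) (hne : i ≠ j)
    (hpi : p l[i]) (hpj : p l[j]) : 2 ≤ l.countP p := by
  -- wlog i < j
  rcases Nat.lt_or_ge i j with hij | hge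
  case _ =>
    have hsplit : l = l.take (i+1) ++ l.drop (i+1) := (List.take_append_drop (i+1) l).symm
    have h1 : l[i] ∈ l.take (i+1) := by
      have : (l.take (i+1))[i]'(by simp; omega) = l[i] := List.getElem_take
      exact this ▸ List.getElem_mem _
    have h2 : l[j] ∈ l.drop (i+1) := by
      have hlt : j - (i+1) < (l.drop (i+1)).length := by simp; omega
      have : (l.drop (i+1))[j - (i+1)]'hlt = l[j] := by
        rw [List.getElem_drop]; congr 1; omega
      exact this ▸ List.getElem_mem _
    have c1 : 0 < (l.take (i+1)).countP p := List.countP_pos_iff.mpr ⟨l[i], h1, hpi⟩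
    have c2 : 0 < (l.drop (i+1)).countP p := List.countP_pos_iff.mpr ⟨l[j], h2, hpj⟩
    calc 2 ≤ (l.take (i+1)).countP p + (l.drop (i+1)).countP p := by omega
    _ = l.countP p := by rw [← List.countP_append, ← hsplit]
  case _ =>
    have hij : j < i := by omega
    have hsplit : l = l.take (j+1) ++ l.drop (j+1) := (List.take_append_drop (j+1) l).symm
    have h1 : l[j] ∈ l.take (j+1) := by
      have : (l.take (j+1))[j]'(by simp; omega) = l[j] := List.getElem_take
      exact this ▸ List.getElem_mem _
    have h2 : l[i] ∈ l.drop (j+1) := by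
      have hlt : i - (j+1) < (l.drop (j+1)).length := by simp; omega
      have : (l.drop (j+1))[i - (j+1)]'hlt = l[i] := by
        rw [List.getElem_drop]; congr 1; omega
      exact this ▸ List.getElem_mem _
    have c1 : 0 < (l.take (j+1)).countP p := List.countP_pos_iff.mpr ⟨l[j], h1, hpj⟩
    have c2 : 0 < (l.drop (j+1)).countP p := List.countP_pos_iff.mpr ⟨l[i], h2, hpi⟩
    calc 2 ≤ (l.take (j+1)).countP p + (l.drop (j+1)).countP p := by omega
    _ = l.countP p := by rw [← List.countP_append, ← hsplit]

-- if p fails at every index other than i0, countP ≤ 1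
theorem pv_countP_le_one (l : List Int) (p : Int → Bool) (i0 : Nat) (hi0 : i0 < l.length)
    (h : ∀ (j : Nat) (hj : j < l.length), j ≠ i0 → ¬ p l[j]) : l.countP p ≤ 1 := by
  have hsplit : l = l.take i0 ++ l.drop i0 := (List.take_append_drop i0 l).symm
  have c1 : (l.take i0).countP p = 0 := by
    rw [List.countP_eq_zero]
    intro a ha
    obtain ⟨k, hk, hka⟩ := List.mem_iff_getElem.mp ha
    have hk' : k < i0 := by simp at hk; omega
    have : (l.take i0)[k]'hk = l[k]'(by omega) := List.getElem_take
    rw [this] at hka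
    rw [← hka]
    exact h k (by omega) (by omega)
  have hdrop : l.drop i0 = l[i0] :: l.drop (i0+1) := List.drop_eq_getElem_cons hi0
  have c2 : (l.drop (i0+1)).countP p = 0 := by
    rw [List.countP_eq_zero]
    intro a ha
    obtain ⟨k, hk, hka⟩ := List.mem_iff_getElem.mp ha
    have hk' : i0 + 1 + k < l.length := by simp at hk; omega
    have : (l.drop (i0+1))[k]'hk = l[i0+1+k]'hk' := List.getElem_drop
    rw [this] at hka
    rw [← hka]
    exact h (i0+1+k) hk' (by omega)
  calc l.countP p = (l.take i0).countP p + (l.drop i0).countP p := by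
        rw [← List.countP_append, ← hsplit]
    _ ≤ 1 := by rw [c1, hdrop, List.countP_cons]; split_ifs <;> omega

-- the counting characterisation of pvQual
theorem pv_qual_iff_count (values : List Int) (m x : Int) (hx : x ∈ values) :
    pvQual values m x ↔
      (if PySem.Int.mod (x + x) m = 0 then 2 else 1) ≤
        values.countP (fun w => decide (PySem.Int.mod (x + w) m = 0)) := by
  obtain ⟨i0, hi0, hxi0⟩ := List.mem_iff_getElem.mp hx
  constructor
  · rintro ⟨i, j, hi, hj, hne, hvi, hmod⟩
    by_cases hself : PySem.Int.mod (x + x) m = 0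
    · rw [if_pos hself]
      exact pv_two_le_countP values _ i j hi hj hne
        (by simp [hvi, hself]) (by simp [hmod])
    · rw [if_neg hself]
      have : 0 < values.countP (fun w => decide (PySem.Int.mod (x + w) m = 0)) :=
        List.countP_pos_iff.mpr ⟨values[j], List.getElem_mem _, by simp [hmod]⟩
      omega
  · intro hcount
    by_cases hself : PySem.Int.mod (x + x) m = 0
    · rw [if_pos hself] at hcount
      by_contra hq
      have hall : ∀ (j : Nat) (hj : j < values.length), j ≠ i0 →
          ¬ (fun w => decide (PySem.Int.mod (x + w) m = 0)) values[j] := by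
        intro j hj hne hp
        exact hq ⟨i0, j, hi0, hj, fun h => hne h.symm, hxi0, by simpa using hp⟩
      have := pv_countP_le_one values (fun w => decide (PySem.Int.mod (x + w) m = 0)) i0 hi0 hall
      omega
    · rw [if_neg hself] at hcount
      have : 0 < values.countP (fun w => decide (PySem.Int.mod (x + w) m = 0)) := by omega
      obtain ⟨w, hw, hpw⟩ := List.countP_pos_iff.mp this
      obtain ⟨j, hj, hwj⟩ := List.mem_iff_getElem.mp hw
      refine ⟨i0, j, hi0, hj, ?_, hxi0, by rw [hwj]; simpa using hpw⟩
      intro hij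
      apply hself
      have hwx : w = x := by rw [← hwj]; subst hij; exact hxi0
      simp only [decide_eq_true_eq] at hpw
      rwa [hwx] at hpw

-- A's outer-loop step
def pvStep (values : List Int) (multiple : Int) (vis : PySem.Set Int) (p : Int × Int) : PySem.Set Int :=
  if PySem.Set.contains vis p.2 then vis
  else pvLoopJ values multiple p.1 p.2 vis (PySem.List.pyRange 0 (PySem.List.len values) 1)

theorem pvStep_def (values : List Int) (multiple : Int) :
    selectedTotal values multiple =
      ((PySem.List.enumerate values 0).foldl (pvStep values multiple) PySem.Set.empty).sum := rfl

-- pvHit on the full index range: some j means a genuine partner index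
theorem pvHit_some (values : List Int) (m i val j : Int)
    (h : pvHit values m i val (PySem.List.pyRange 0 (PySem.List.len values) 1) = some j) :
    0 ≤ j ∧ j < values.length ∧ i ≠ j ∧
      PySem.Int.mod (val + PySem.List.pyGetD values j 0) m = 0 := by
  have hmem := List.mem_of_find?_eq_some h
  have hp := List.find?_some h
  simp only [PySem.List.len_eq] at hmem
  rw [PySem.List.mem_pyRange_one] at hmem
  simp only [decide_eq_true_eq] at hp
  exact ⟨hmem.1, by exact_mod_cast hmem.2, hp.1, hp.2⟩

theorem pvHit_isSome (values : List Int) (m i val : Int) (k : Nat)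
    (hk : k < values.length) (hik : i = (k : Int))
    (hq : ∃ (jj : Nat) (hjj : jj < values.length),
        jj ≠ k ∧ PySem.Int.mod (val + values[jj]) m = 0) :
    (pvHit values m i val (PySem.List.pyRange 0 (PySem.List.len values) 1)).isSome := by
  obtain ⟨jj, hjj, hne, hmod⟩ := hq
  rw [pvHit, List.find?_isSome]
  refine ⟨(jj : Int), ?_, ?_⟩
  · simp only [PySem.List.len_eq]
    rw [PySem.List.mem_pyRange_one]
    exact ⟨Int.natCast_nonneg jj, by exact_mod_cast hjj⟩
  · simp only [decide_eq_true_eq]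
    constructor
    · intro h; apply hne; rw [hik] at h; exact_mod_cast h.symm
    · rw [PySem.List.pyGetD_natCast]
      rw [List.getD_eq_getElem _ _ hjj]
      exact hmod

-- what a qualified value demands, re-centred on the occurrence index k
theorem pv_qual_partner_at (values : List Int) (m val : Int) (k : Nat)
    (hk : k < values.length) (hvk : values[k] = val) (hq : pvQual values m val) :
    ∃ (jj : Nat) (hjj : jj < values.length), jj ≠ k ∧ PySem.Int.mod (val + values[jj]) m = 0 := by
  obtain ⟨i, j, hi, hj, hne, hvi, hmod⟩ := hq
  by_cases hjk : j = k
  · -- partner sits at k itself: then val+val ≡ 0, use i (≠ j = k) as partner index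
    subst hjk
    have hself : PySem.Int.mod (val + val) m = 0 := by rwa [hvk] at hmod
    exact ⟨i, hi, fun h => hne h, by rwa [hvi]⟩
  · exact ⟨j, hj, hjk, hmod⟩

-- one outer step: soundness, monotonicity, completeness-for-its-value, nodup
theorem pvStep_sound (values : List Int) (m : Int) (vis : PySem.Set Int) (p : Int × Int)
    (k : Nat) (hk : k < values.length) (hk1 : p.1 = (k : Int)) (hk2 : p.2 = values[k])
    (x : Int) (hx : x ∈ pvStep values m vis p) : x ∈ vis ∨ pvQual values m x := by
  rw [pvStep] at hx
  by_cases hc : PySem.Set.contains vis p.2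
  · rw [if_pos hc] at hx; exact Or.inl hx
  · rw [if_neg hc, pvLoopJ_eq_hit] at hx
    cases hhit : pvHit values m p.1 p.2 (PySem.List.pyRange 0 (PySem.List.len values) 1) with
    | none => rw [hhit] at hx; exact Or.inl hx
    | some j =>
      rw [hhit] at hx
      obtain ⟨hj0, hjlen, hij, hmod⟩ := pvHit_some values m p.1 p.2 j hhit
      have hjn : j.toNat < values.length := by omega
      have hgetj : PySem.List.pyGetD values j 0 = values[j.toNat] := by
        rw [PySem.List.pyGetD_eq_getElem values 0 hj0 (by exact_mod_cast hjlen)]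
      have hkj : k ≠ j.toNat := by
        intro h; apply hij; rw [hk1, h]; omega
      simp only [PySem.Set.mem_add] at hx
      rcases hx with (hx | hx) | hx
      · exact Or.inl hx
      · -- x = val : partner at j.toNat
        right
        exact ⟨k, j.toNat, hk, hjn, hkj, (hx.trans hk2).symm, by
          rw [hx, ← hgetj]; exact hmod⟩
      · -- x = values[j] : partner back at k
        right
        refine ⟨j.toNat, k, hjn, hk, fun h => hkj h.symm, by rw [hx]; exact hgetj.symm, ?_⟩
        have h' : PySem.Int.mod (values[k] + values[j.toNat]) m = 0 := by
          rw [← hk2, ← hgetj]; exact hmod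
        rw [hx, hgetj, add_comm]
        exact h'

theorem pvStep_mono (values : List Int) (m : Int) (vis : PySem.Set Int) (p : Int × Int)
    (x : Int) (hx : x ∈ vis) : x ∈ pvStep values m vis p := by
  rw [pvStep]
  by_cases hc : PySem.Set.contains vis p.2
  · rwa [if_pos hc]
  · rw [if_neg hc, pvLoopJ_eq_hit]
    cases pvHit values m p.1 p.2 (PySem.List.pyRange 0 (PySem.List.len values) 1) with
    | none => exact hx
    | some j => simp only [PySem.Set.mem_add]; exact Or.inl (Or.inl hx)

theorem pvStep_ensures (values : List Int) (m : Int) (vis : PySem.Set Int) (p : Int × Int)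
    (k : Nat) (hk : k < values.length) (hk1 : p.1 = (k : Int)) (hk2 : p.2 = values[k])
    (hq : pvQual values m p.2) : p.2 ∈ pvStep values m vis p := by
  rw [pvStep]
  by_cases hc : PySem.Set.contains vis p.2
  · rw [if_pos hc]; exact (PySem.Set.contains_iff vis p.2).mp hc
  · rw [if_neg hc, pvLoopJ_eq_hit]
    have hsome := pvHit_isSome values m p.1 p.2 k hk hk1
      (pv_qual_partner_at values m p.2 k hk hk2.symm hq)
    cases hhit : pvHit values m p.1 p.2 (PySem.List.pyRange 0 (PySem.List.len values) 1) with
    | none => rw [hhit] at hsome; simp at hsome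
    | some j => simp [PySem.Set.mem_add]

theorem pvStep_nodup (values : List Int) (m : Int) (vis : PySem.Set Int) (p : Int × Int)
    (hnd : vis.Nodup) : (pvStep values m vis p).Nodup := by
  rw [pvStep]
  by_cases hc : PySem.Set.contains vis p.2
  · rwa [if_pos hc]
  · rw [if_neg hc, pvLoopJ_eq_hit]
    cases pvHit values m p.1 p.2 (PySem.List.pyRange 0 (PySem.List.len values) 1) with
    | none => exact hnd
    | some j => exact PySem.Set.nodup_add _ _ (PySem.Set.nodup_add _ _ hnd)

-- the big fold invariant
theorem pv_foldA_spec (values : List Int) (m : Int) (l : List (Int × Int))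
    (vis : PySem.Set Int)
    (hl : ∀ p ∈ l, ∃ (k : Nat) (hk : k < values.length), p.1 = (k : Int) ∧ p.2 = values[k])
    (hsound : ∀ x ∈ vis, pvQual values m x) (hnd : vis.Nodup) :
    (∀ x ∈ l.foldl (pvStep values m) vis, pvQual values m x) ∧
    (∀ x ∈ vis, x ∈ l.foldl (pvStep values m) vis) ∧
    (∀ p ∈ l, pvQual values m p.2 → p.2 ∈ l.foldl (pvStep values m) vis) ∧
    (l.foldl (pvStep values m) vis).Nodup := by
  induction l generalizing vis with
  | nil => exact ⟨hsound, fun x hx => hx, fun p hp => absurd hp (List.not_mem_nil), hnd⟩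
  | cons p l ih =>
    obtain ⟨k, hk, hk1, hk2⟩ := hl p List.mem_cons_self
    have hsound' : ∀ x ∈ pvStep values m vis p, pvQual values m x := by
      intro x hx
      rcases pvStep_sound values m vis p k hk hk1 hk2 x hx with h | h
      · exact hsound x h
      · exact h
    have hnd' := pvStep_nodup values m vis p hnd
    obtain ⟨ih1, ih2, ih3, ih4⟩ := ih (pvStep values m vis p)
      (fun q hq => hl q (List.mem_cons_of_mem _ hq)) hsound' hnd'
    refine ⟨?_, ?_, ?_, ?_⟩
    · simpa [List.foldl_cons] using ih1
    · intro x hx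
      simpa [List.foldl_cons] using ih2 x (pvStep_mono values m vis p x hx)
    · intro q hq hquala
      rcases List.mem_cons.mp hq with rfl | hq'
      · simpa [List.foldl_cons] using
          ih2 q.2 (pvStep_ensures values m vis q k hk hk1 hk2 hquala)
      · simpa [List.foldl_cons] using ih3 q hq' hquala
    · simpa [List.foldl_cons] using ih4

-- final characterisation of A's set
theorem pv_visA_iff (values : List Int) (m : Int) (x : Int) :
    (x ∈ (PySem.List.enumerate values 0).foldl (pvStep values m) PySem.Set.empty ↔
      pvQual values m x) ∧
    ((PySem.List.enumerate values 0).foldl (pvStep values m) PySem.Set.empty).Nodup := by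
  have hl : ∀ p ∈ PySem.List.enumerate values 0,
      ∃ (k : Nat) (hk : k < values.length), p.1 = (k : Int) ∧ p.2 = values[k] := by
    intro p hp
    rw [PySem.List.mem_enumerate_iff] at hp
    obtain ⟨k, hk, hpk⟩ := hp
    exact ⟨k, hk, by rw [hpk]; simp, by rw [hpk]⟩
  obtain ⟨h1, _h2, h3, h4⟩ := pv_foldA_spec values m (PySem.List.enumerate values 0)
    PySem.Set.empty hl (by intro x hx; exact absurd hx (List.not_mem_nil)) List.nodup_nil
  refine ⟨⟨fun hx => h1 x hx, fun hq => ?_⟩, h4⟩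
  have hq' := hq
  obtain ⟨i, j, hi, hj, _, hvi, _⟩ := hq'
  have hp : ((i : Int), x) ∈ PySem.List.enumerate values 0 := by
    rw [PySem.List.mem_enumerate_iff]
    exact ⟨i, hi, by rw [← hvi]; simp⟩
  exact h3 ((i : Int), x) hp hq

-- ===== B side =====

-- B's per-value test, extracted
def pvCondB (values : List Int) (m v : Int) : Bool :=
  decide (0 <
    (let cnt : PySem.Dict Int Int := values.foldl
        (fun d w => d.insert (PySem.Int.mod w m) (d.getD (PySem.Int.mod w m) 0 + 1))
        PySem.Dict.empty
     let c := cnt.getD (PySem.Int.mod (-v) m) 0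
     if PySem.Int.mod (-v) m = PySem.Int.mod v m then c - 1 else c))

theorem pv_foldl_if_add (P : Int → Prop) [DecidablePred P] (l : List Int) (init : Int) :
    l.foldl (fun t v => if P v then t + v else t) init
      = init + (l.filter (fun v => decide (P v))).sum := by
  induction l generalizing init with
  | nil => simp
  | cons a l ih =>
    by_cases h : P a <;> simp [List.filter_cons, h, ih] <;> ring

theorem pv_alt_eq_filter_sum (values : List Int) (m : Int) :
    selectedTotal_alt values m = ((PySem.Set.ofList values).filter (pvCondB values m)).sum := by
  show (PySem.Set.ofList values).foldl _ 0 = _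
  rw [pv_foldl_if_add (fun v =>
    (0 : Int) <
      (let cnt : PySem.Dict Int Int := values.foldl
          (fun d w => d.insert (PySem.Int.mod w m) (d.getD (PySem.Int.mod w m) 0 + 1))
          PySem.Dict.empty
       let c := cnt.getD (PySem.Int.mod (-v) m) 0
       if PySem.Int.mod (-v) m = PySem.Int.mod v m then c - 1 else c))]
  rw [zero_add]
  rfl

-- the counter dict looks up the residue count
theorem pv_cnt_getD (values : List Int) (m q : Int) :
    (values.foldl
      (fun d w => d.insert (PySem.Int.mod w m) (d.getD (PySem.Int.mod w m) 0 + 1))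
      PySem.Dict.empty).getD q 0
      = ((values.map (fun w => PySem.Int.mod w m)).count q : Int) := by
  have h1 := List.foldl_map (f := fun w : Int => PySem.Int.mod w m)
    (g := fun (d : PySem.Dict Int Int) (r : Int) => d.insert r (d.getD r 0 + 1))
    (l := values) (init := PySem.Dict.empty)
  rw [← h1, PySem.Dict.foldl_insert_getD_add_one_eq_counter, PySem.Dict.getD_counter]

theorem pv_count_map_residue (values : List Int) (m v : Int) :
    (values.map (fun w => PySem.Int.mod w m)).count (PySem.Int.mod (-v) m)
      = values.countP (fun w => decide (PySem.Int.mod (v + w) m = 0)) := by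
  rw [List.count_eq_countP, List.countP_map]
  apply List.countP_congr
  intro w _
  by_cases h : PySem.Int.mod (v + w) m = 0
  · have h2 := (pv_partner_iff v w m).mp h
    simp [Function.comp, h, h2]
  · have h2 : ¬ PySem.Int.mod w m = PySem.Int.mod (-v) m :=
      fun hh => h ((pv_partner_iff v w m).mpr hh)
    simp [Function.comp, h, h2]

-- B's test is exactly pvQual on members of values
theorem pv_condB_iff_qual (values : List Int) (m v : Int) (hv : v ∈ values) :
    pvCondB values m v = true ↔ pvQual values m v := by
  rw [pv_qual_iff_count values m v hv]
  rw [pvCondB]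
  simp only [pv_cnt_getD, pv_count_map_residue, decide_eq_true_eq]
  by_cases hself : PySem.Int.mod (v + v) m = 0
  · rw [if_pos ((pv_self_iff v m).mpr hself), if_pos hself]
    omega
  · rw [if_neg (fun h => hself ((pv_self_iff v m).mp h)), if_neg hself]
    omega

-- ===== VERDICT (by name: the statement is the Claim_ definition above) =====
theorem selectedTotal_spec : Claim_equal_selectedTotal := by
  intro values multiple _hdom _hpre
  unfold Spec_selectedTotal
  rw [pvStep_def, pv_alt_eq_filter_sum]
  apply List.Perm.sum_eq
  apply (List.perm_ext_iff_of_nodup (pv_visA_iff values multiple 0).2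
    ((PySem.Set.nodup_ofList values).filter _)).mpr
  intro x
  rw [(pv_visA_iff values multiple x).1, List.mem_filter, PySem.Set.mem_ofList]
  constructor
  · intro hq
    have hx : x ∈ values := by
      obtain ⟨i, j, hi, hj, _, hvi, _⟩ := hq
      exact hvi ▸ List.getElem_mem _
    exact ⟨hx, (pv_condB_iff_qual values multiple x hx).mpr hq⟩
  · rintro ⟨hv, hc⟩
    exact (pv_condB_iff_qual values multiple x hv).mp hc
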